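-- pv_equiv track=rewrite | github.com/vshilman/shadowframework20lite | trunk/BlenderSFBExporter2/algorithm1.py | compute_patch_edges
-- ===== SOURCE A (Python) =====
-- def compute_patch_edges(faces_verts, all_edges):
--     '''Compute which edges belong to which face'''
--     patches = []
--     for partition in faces_verts:
--         current_edges = []
--         for edge in all_edges:
--             if any((pp in edge) for pp in partition):
--                 current_edges.append(edge)
--         patches.append(current_edges)
--     return patches
-- ===== SOURCE B (Python) =====
-- def compute_patch_edges(faces_verts, all_edges):
--     '''Compute which edges belong to which face'''
--     incident = {}
--     for item in enumerate(all_edges):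
--         _, edge = item
--         incident.setdefault(edge[0], []).append(item)
--         incident.setdefault(edge[1], []).append(item)
--
--     def face_edges(partition):
--         seen = set()
--         for v in partition:
--             seen.update(incident.get(v, []))
--         return [t[1] for t in sorted(seen, key=lambda t: t[0])]
--
--     return [face_edges(p) for p in faces_verts]
-- ===== Notes on version B (the rewrite author's own statement) =====
-- stated objective: faster
-- what changed: B builds a vertex-to-(index,edge) dict in one pass over enumerate(all_edges), then for each face unions those incident lists over only the face's vertices into a set and sorts by edge index to restore all_edges order, eliminating A's per-face rescan of all_edges.
import Mathlib
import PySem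

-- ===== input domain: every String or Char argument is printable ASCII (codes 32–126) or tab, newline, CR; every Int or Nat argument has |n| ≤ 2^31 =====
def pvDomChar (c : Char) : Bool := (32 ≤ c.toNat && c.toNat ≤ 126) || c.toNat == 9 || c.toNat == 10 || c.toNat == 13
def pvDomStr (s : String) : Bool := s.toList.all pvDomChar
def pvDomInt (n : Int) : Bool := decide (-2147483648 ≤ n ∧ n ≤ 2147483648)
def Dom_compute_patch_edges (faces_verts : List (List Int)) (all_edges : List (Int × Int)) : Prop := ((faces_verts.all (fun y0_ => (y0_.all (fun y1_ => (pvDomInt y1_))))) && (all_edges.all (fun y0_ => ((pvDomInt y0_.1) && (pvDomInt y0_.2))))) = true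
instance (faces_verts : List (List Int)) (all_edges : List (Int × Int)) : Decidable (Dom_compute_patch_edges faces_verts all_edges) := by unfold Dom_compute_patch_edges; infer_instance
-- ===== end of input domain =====

-- B replaces A's per-face rescan of all_edges by a vertex→incident-(index,edge) dict built in one
-- pass, then per face a set-union over only the face's vertices plus a sort by edge index (alternative).
-- ===== PORT A =====
def compute_patch_edges (faces_verts : List (List Int)) (all_edges : List (Int × Int)) : List (List (Int × Int)) :=
  faces_verts.foldl (fun patches partition =>
    patches ++ [all_edges.foldl (fun current_edges edge =>
      if partition.any (fun pp => pp == edge.1 || pp == edge.2) then current_edges ++ [edge]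
      else current_edges) []]) []

-- ===== PORT B =====
-- incident.setdefault(edge[0], []).append(item); incident.setdefault(edge[1], []).append(item)
def pvIncident (all_edges : List (Int × Int)) : PySem.Dict Int (List (Int × (Int × Int))) :=
  (PySem.List.enumerate all_edges).foldl (fun d item =>
    (d.modify item.2.1 [] (· ++ [item])).modify item.2.2 [] (· ++ [item])) PySem.Dict.empty

-- face_edges(partition): union the incident lists over the face's vertices, sort by index, drop indices
def pvFaceEdges (incident : PySem.Dict Int (List (Int × (Int × Int)))) (partition : List Int) : List (Int × Int) :=
  let seen : PySem.Set (Int × (Int × Int)) :=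
    partition.foldl (fun s v => PySem.Set.update s (incident.getD v [])) PySem.Set.empty
  (PySem.List.sorted seen (fun t => t.1) false).map (fun t => t.2)

def compute_patch_edges_alt (faces_verts : List (List Int)) (all_edges : List (Int × Int)) : List (List (Int × Int)) :=
  let incident := pvIncident all_edges
  faces_verts.map (fun p => pvFaceEdges incident p)

-- ===== PRECONDITION & SPEC =====
def Spec_compute_patch_edges (faces_verts : List (List Int)) (all_edges : List (Int × Int)) (out : List (List (Int × Int))) : Prop := out = compute_patch_edges_alt faces_verts all_edges
instance (faces_verts : List (List Int)) (all_edges : List (Int × Int)) (out : List (List (Int × Int))) : Decidable (Spec_compute_patch_edges faces_verts all_edges out) := by unfold Spec_compute_patch_edges; infer_instance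

-- ===== CLAIM (what is proved, stated in full; the proofs are below) =====
def Claim_equal_compute_patch_edges : Prop := ∀ (faces_verts : List (List Int)) (all_edges : List (Int × Int)), Dom_compute_patch_edges faces_verts all_edges → Spec_compute_patch_edges faces_verts all_edges (compute_patch_edges faces_verts all_edges)

-- ===== LEMMAS AND PROOFS =====

-- membership in a fold of set-unions: x was gathered iff some v in the list contributed it
theorem mem_foldl_update {α β : Type} [BEq α] [LawfulBEq α] (g : β → List α) (l : List β)
    (s : PySem.Set α) (x : α) :
    x ∈ l.foldl (fun s v => PySem.Set.update s (g v)) s ↔ x ∈ s ∨ ∃ v ∈ l, x ∈ g v := by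
  induction l generalizing s with
  | nil => simp
  | cons v vs ih =>
      simp only [List.foldl_cons, ih, PySem.Set.mem_update, List.mem_cons]
      constructor
      · rintro ((h|h)|⟨w,hw,hx⟩)
        exacts [Or.inl h, Or.inr ⟨v, Or.inl rfl, h⟩, Or.inr ⟨w, Or.inr hw, hx⟩]
      · rintro (h|⟨w,(rfl|hw),hx⟩)
        exacts [Or.inl (Or.inl h), Or.inl (Or.inr hx), Or.inr ⟨w,hw,hx⟩]

theorem nodup_foldl_update {α β : Type} [BEq α] [LawfulBEq α] (g : β → List α) (l : List β)
    (s : PySem.Set α) (hs : s.Nodup) :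
    (l.foldl (fun s v => PySem.Set.update s (g v)) s).Nodup := by
  induction l generalizing s with
  | nil => exact hs
  | cons v vs ih => exact ih _ (PySem.Set.nodup_update _ _ hs)

-- one iteration of the incident-dict build, seen through getD at an arbitrary vertex v
theorem getD_step (d : PySem.Dict Int (List (Int × (Int × Int)))) (item : Int × (Int × Int))
    (v : Int) (x : Int × (Int × Int)) :
    (x ∈ ((d.modify item.2.1 [] (· ++ [item])).modify item.2.2 [] (· ++ [item])).getD v []) ↔
      x ∈ d.getD v [] ∨ (x = item ∧ (item.2.1 = v ∨ item.2.2 = v)) := by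
  simp only [PySem.Dict.getD_modify]
  split_ifs with h1 h2 h2 <;> simp_all <;> tauto

def stepf : PySem.Dict Int (List (Int × (Int × Int))) → (Int × (Int × Int)) → PySem.Dict Int (List (Int × (Int × Int))) :=
  fun d item => (d.modify item.2.1 [] (· ++ [item])).modify item.2.2 [] (· ++ [item])

-- incident-dict characterisation: item listed under v iff it is an enumerated edge touching v
theorem mem_foldl_step (l : List (Int × (Int × Int))) (d : PySem.Dict Int (List (Int × (Int × Int))))
    (v : Int) (x : Int × (Int × Int)) :
    x ∈ (l.foldl stepf d).getD v [] ↔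
      x ∈ d.getD v [] ∨ (x ∈ l ∧ (x.2.1 = v ∨ x.2.2 = v)) := by
  induction l generalizing d with
  | nil => simp
  | cons it its ih =>
      simp only [List.foldl_cons, ih, List.mem_cons]
      rw [show stepf d it = (d.modify it.2.1 [] (· ++ [it])).modify it.2.2 [] (· ++ [it]) from rfl]
      rw [getD_step]
      constructor
      · rintro ((h|⟨he,h⟩)|⟨hm,h⟩)
        exacts [Or.inl h, Or.inr ⟨Or.inl he, he.symm ▸ h⟩, Or.inr ⟨Or.inr hm, h⟩]
      · rintro (h|⟨(he|hm),h⟩)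
        exacts [Or.inl (Or.inl h), Or.inl (Or.inr ⟨he, he ▸ h⟩), Or.inr ⟨hm, h⟩]

-- dropping indices from an index-filtered enumeration is filtering the list itself
theorem filter_map_snd_enumerate (l : List (Int × Int)) (s : Int) (P : (Int × Int) → Bool) :
    (((PySem.List.enumerate l s).filter (fun t => P t.2)).map (fun t => t.2)) = l.filter P := by
  induction l generalizing s with
  | nil => simp [PySem.List.enumerate_nil]
  | cons e es ih =>
      rw [PySem.List.enumerate_cons]
      by_cases h : P e = true <;> simp [h, ih]

-- B's per-face gather-and-sort equals A's per-face filter of all_edges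
theorem pvFaceEdges_eq_filter (all_edges : List (Int × Int)) (partition : List Int) :
    pvFaceEdges (pvIncident all_edges) partition
      = all_edges.filter (fun e => partition.any (fun pp => pp == e.1 || pp == e.2)) := by
  change (PySem.List.sorted (partition.foldl (fun s v =>
      PySem.Set.update s ((pvIncident all_edges).getD v [])) PySem.Set.empty)
      (fun t => t.1) false).map (fun t => t.2) = _
  set P : (Int × Int) → Bool := fun e => partition.any (fun pp => pp == e.1 || pp == e.2) with hP
  set seen := partition.foldl (fun s v => PySem.Set.update s ((pvIncident all_edges).getD v []))
    PySem.Set.empty with hseen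
  set ys := (PySem.List.enumerate all_edges).filter (fun t => P t.2) with hys
  have hmem : ∀ x, x ∈ ys ↔ x ∈ seen := by
    intro x
    rw [hseen, mem_foldl_update, hys, List.mem_filter]
    simp only [PySem.Set.empty, List.not_mem_nil, false_or]
    have hg : ∀ v, x ∈ (pvIncident all_edges).getD v [] ↔
        x ∈ PySem.List.enumerate all_edges ∧ (x.2.1 = v ∨ x.2.2 = v) := by
      intro v
      unfold pvIncident
      rw [show (fun (d : PySem.Dict Int (List (Int × (Int × Int)))) item =>
        (d.modify item.2.1 [] (· ++ [item])).modify item.2.2 [] (· ++ [item])) = stepf from rfl]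
      rw [mem_foldl_step]
      simp [PySem.Dict.getD_empty]
    simp only [hg, hP, List.any_eq_true, Bool.or_eq_true, beq_iff_eq]
    constructor
    · rintro ⟨hx, pp, hpp, (h|h)⟩
      exacts [⟨pp, hpp, hx, Or.inl h.symm⟩, ⟨pp, hpp, hx, Or.inr h.symm⟩]
    · rintro ⟨pp, hpp, hx, (h|h)⟩
      exacts [⟨hx, pp, hpp, Or.inl h.symm⟩, ⟨hx, pp, hpp, Or.inr h.symm⟩]
  have hnd_seen : seen.Nodup := nodup_foldl_update _ _ _ (List.nodup_nil)
  have hpair : ys.Pairwise (fun a b => a.1 < b.1) :=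
    (PySem.List.pairwise_lt_enumerate all_edges 0).filter _
  have hnd_ys : ys.Nodup := hpair.imp (fun h he => by subst he; exact lt_irrefl _ h)
  have hperm : ys.Perm seen := (List.perm_ext_iff_of_nodup hnd_ys hnd_seen).2 hmem
  rw [PySem.List.sorted_eq_of_perm_of_pairwise_lt seen ys (fun t => t.1) hperm hpair]
  exact filter_map_snd_enumerate all_edges 0 P

-- ===== VERDICT (by name: the statement is the Claim_ definition above) =====
theorem compute_patch_edges_spec : Claim_equal_compute_patch_edges := by
  intro faces_verts all_edges _
  unfold Spec_compute_patch_edges compute_patch_edges compute_patch_edges_alt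
  rw [PySem.List.foldl_append_singleton_eq_map]
  simp only [List.nil_append]
  apply List.map_congr_left
  intro p _
  rw [PySem.List.foldl_append_if_eq_filter, pvFaceEdges_eq_filter]
  simp
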